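-- pv_equiv track=rewrite | github.com/ZididadaSunshine/KeywordExtraction | preprocessing/text_preprocessing.py | get_cooccurence_matrix
-- ===== SOURCE A (Python) =====
-- def get_cooccurence_matrix(tokenized_text, tokens):
--     tokens = list(tokens)
--     # 2-d matrix where ["some"]["string"] yield the cooccurrence of "some" and "string"
--     matrix = [[0 for token in tokens] for token in tokens]
--     token_indexes = {token : tokens.index(token) for token in tokenized_text}
--
--     sentences = [ tokenized_text[i:i + 2] for i in range(len(tokenized_text) - 1)]
--     for sentence in sentences:
--         idx1 = token_indexes[sentence[0]]
--         idx2 = token_indexes[sentence[1]]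
--         matrix[idx1][idx2] += 1
--
--     return matrix, token_indexes
-- ===== SOURCE B (Python) =====
-- def get_cooccurence_matrix(tokenized_text, tokens):
--     tokens = list(tokens)
--     n = len(tokens)
--     # first-occurrence index map: reversed insertion order makes the earliest index win
--     first = {t: i for i, t in reversed(list(enumerate(tokens)))}
--     token_indexes = {t: first[t] for t in tokenized_text}
--     # translate the text to its index sequence, group successors by row, then define each
--     # cell declaratively as a count -- no in-place matrix increments at all
--     seq = [token_indexes[t] for t in tokenized_text]
--     rows = {}
--     for a, b in zip(seq, seq[1:]):
--         rows.setdefault(a, []).append(b)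
--     matrix = [[rows.get(i, []).count(j) for j in range(n)] for i in range(n)]
--     return matrix, token_indexes
-- ===== Notes on version B (the rewrite author's own statement) =====
-- stated objective: alternative
-- what changed: B never mutates the matrix: it translates the text to an index sequence (first-occurrence map built from a reversed enumerate instead of repeated tokens.index scans), groups each index's successors with one setdefault-append pass, and defines every matrix cell declaratively as a count within its group, instead of A's per-occurrence += increments driven by slice windows.
import Mathlib
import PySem

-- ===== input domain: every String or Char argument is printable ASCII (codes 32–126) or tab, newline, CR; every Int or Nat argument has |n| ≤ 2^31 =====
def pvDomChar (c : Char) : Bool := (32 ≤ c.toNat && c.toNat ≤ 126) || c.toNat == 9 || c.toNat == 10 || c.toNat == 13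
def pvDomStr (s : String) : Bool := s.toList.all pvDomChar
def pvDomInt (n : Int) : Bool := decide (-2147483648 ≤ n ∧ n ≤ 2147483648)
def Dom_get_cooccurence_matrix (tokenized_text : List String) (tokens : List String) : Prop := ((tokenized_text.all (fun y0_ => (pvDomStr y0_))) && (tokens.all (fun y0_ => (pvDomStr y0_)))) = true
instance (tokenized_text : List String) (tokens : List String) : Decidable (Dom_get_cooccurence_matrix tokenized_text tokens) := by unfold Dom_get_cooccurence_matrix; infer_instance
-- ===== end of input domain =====

-- B builds no matrix increments at all: it maps the text to an index sequence (first-occurrence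
-- map from a reversed enumerate), groups each index's successors once, and defines each
-- matrix cell declaratively as a count within its group.

-- ===== PORT A =====
def get_cooccurence_matrix (tokenized_text : List String) (tokens : List String) : List (List Int) × (List (String × Int)) :=
  let matrix := tokens.map (fun _ => tokens.map (fun _ => (0 : Int)))
  let token_indexes : PySem.Dict String Int :=
    tokenized_text.foldl
      (fun d token => d.insert token (((PySem.List.index? tokens token).getD 0 : Nat) : Int))
      PySem.Dict.empty
  let sentences := (PySem.List.pyRange 0 ((tokenized_text.length : Int) - 1) 1).map
      (fun i => PySem.List.slice tokenized_text (some i) (some (i + 2)))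
  let matrix := sentences.foldl
      (fun m sentence =>
        let idx1 := token_indexes.getD (PySem.List.pyGetD sentence 0 "") 0
        let idx2 := token_indexes.getD (PySem.List.pyGetD sentence 1 "") 0
        PySem.List.pySetD m idx1
          (PySem.List.pySetD (PySem.List.pyGetD m idx1 []) idx2
            (PySem.List.pyGetD (PySem.List.pyGetD m idx1 []) idx2 0 + 1)))
      matrix
  (matrix, token_indexes.items)

-- ===== PORT B =====
def get_cooccurence_matrix_alt (tokenized_text : List String) (tokens : List String) : List (List Int) × (List (String × Int)) :=
  let n := tokens.length
  let first : PySem.Dict String Int :=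
    ((PySem.List.enumerate tokens 0).reverse).foldl (fun d p => d.insert p.2 p.1) PySem.Dict.empty
  let token_indexes : PySem.Dict String Int :=
    tokenized_text.foldl (fun d t => d.insert t (first.getD t 0)) PySem.Dict.empty
  let seq := tokenized_text.map (fun t => token_indexes.getD t 0)
  let rows : PySem.Dict Int (List Int) :=
    (seq.zip seq.tail).foldl (fun d p => d.modify p.1 [] (· ++ [p.2])) PySem.Dict.empty
  let matrix := (PySem.List.pyRange 0 (n : Int) 1).map
      (fun i => (PySem.List.pyRange 0 (n : Int) 1).map
        (fun j => (((rows.getD i []).count j : Nat) : Int)))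
  (matrix, token_indexes.items)

-- ===== PRECONDITION & SPEC =====
-- Pre_ excludes exactly the inputs where A raises: a token of tokenized_text absent from
-- tokens makes tokens.index raise ValueError (B raises KeyError there too).
def Pre_get_cooccurence_matrix (tokenized_text : List String) (tokens : List String) : Prop :=
  ∀ t ∈ tokenized_text, t ∈ tokens
instance (tokenized_text : List String) (tokens : List String) : Decidable (Pre_get_cooccurence_matrix tokenized_text tokens) := by unfold Pre_get_cooccurence_matrix; infer_instance

def pvWitness_get_cooccurence_matrix : List String × List String := (["a", "b", "a"], ["a", "b", "c"])

def Spec_get_cooccurence_matrix (tokenized_text : List String) (tokens : List String) (out : List (List Int) × (List (String × Int))) : Prop := out = get_cooccurence_matrix_alt tokenized_text tokens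
instance (tokenized_text : List String) (tokens : List String) (out : List (List Int) × (List (String × Int))) : Decidable (Spec_get_cooccurence_matrix tokenized_text tokens out) := by unfold Spec_get_cooccurence_matrix; infer_instance

-- ===== CLAIM (what is proved, stated in full; the proofs are below) =====
def Claim_equal_get_cooccurence_matrix : Prop := ∀ (tokenized_text : List String) (tokens : List String), Dom_get_cooccurence_matrix tokenized_text tokens → Pre_get_cooccurence_matrix tokenized_text tokens → Spec_get_cooccurence_matrix tokenized_text tokens (get_cooccurence_matrix tokenized_text tokens)

-- ===== LEMMAS AND PROOFS =====

-- matrix entry m[i][j] (totalized), the cell write m[i][j] = c, and the n×n shape invariant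
def pvEntry (m : List (List Int)) (i j : Int) : Int :=
  PySem.List.pyGetD (PySem.List.pyGetD m i []) j 0

def pvSetE (m : List (List Int)) (i j c : Int) : List (List Int) :=
  PySem.List.pySetD m i (PySem.List.pySetD (PySem.List.pyGetD m i []) j c)

def pvShape (n : Nat) (m : List (List Int)) : Prop :=
  m.length = n ∧ ∀ r ∈ m, r.length = n

theorem pv_shape_set (n : Nat) (m : List (List Int)) (hm : pvShape n m)
    (i j c : Int) (hi0 : 0 ≤ i) (hi1 : i < (n : Int)) : pvShape n (pvSetE m i j c) := by
  obtain ⟨hlen, hrow⟩ := hm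
  unfold pvSetE
  rw [PySem.List.pySetD_of_nonneg _ _ hi0]
  refine ⟨by simpa using hlen, ?_⟩
  intro r hr
  rcases List.mem_or_eq_of_mem_set hr with h | h
  · exact hrow r h
  · subst h
    rw [PySem.List.length_pySetD,
        PySem.List.pyGetD_eq_getElem _ _ hi0 (by omega)]
    exact hrow _ (List.getElem_mem _)

theorem pv_entry_set (n : Nat) (m : List (List Int)) (hm : pvShape n m)
    {i j p q : Int} (c : Int)
    (hi0 : 0 ≤ i) (hi1 : i < (n : Int)) (hj0 : 0 ≤ j) (_hj1 : j < (n : Int))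
    (hp0 : 0 ≤ p) (hp1 : p < (n : Int)) (hq0 : 0 ≤ q) (hq1 : q < (n : Int)) :
    pvEntry (pvSetE m i j c) p q = if p = i ∧ q = j then c else pvEntry m p q := by
  obtain ⟨hlen, hrow⟩ := hm
  have hiL : i < (m.length : Int) := by omega
  have hpL : p < (m.length : Int) := by omega
  have hrowi : PySem.List.pyGetD m i [] = m[i.toNat]'(by omega) :=
    PySem.List.pyGetD_eq_getElem _ _ hi0 hiL
  have hrlen : (m[i.toNat]'(by omega) : List Int).length = n := hrow _ (List.getElem_mem _)
  unfold pvSetE pvEntry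
  rw [PySem.List.pySetD_of_nonneg _ _ hi0]
  rw [PySem.List.pyGetD_eq_getElem _ _ hp0 (by simpa using hpL), List.getElem_set]
  by_cases hpi : p = i
  · have hnat : i.toNat = p.toNat := by omega
    rw [if_pos hnat, hrowi, PySem.List.pySetD_of_nonneg _ _ hj0]
    rw [PySem.List.pyGetD_eq_getElem _ _ hq0 (by simp [hrlen]; omega), List.getElem_set]
    by_cases hqj : q = j
    · have : j.toNat = q.toNat := by omega
      rw [if_pos this, if_pos ⟨hpi, hqj⟩]
    · have hne : ¬ j.toNat = q.toNat := by omega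
      rw [if_neg hne, if_neg (by tauto)]
      subst hpi
      rw [hrowi, PySem.List.pyGetD_eq_getElem _ _ hq0 (by rw [hrlen]; omega)]
  · have hnat : ¬ i.toNat = p.toNat := by omega
    rw [if_neg hnat, if_neg (by tauto)]
    rw [PySem.List.pyGetD_eq_getElem m _ hp0 hpL]

-- A's increment loop: each entry ends at its start plus the number of pairs hitting it
theorem pv_fold_bump (n : Nat) (P : List (Int × Int))
    (hP : ∀ x ∈ P, 0 ≤ x.1 ∧ x.1 < (n : Int) ∧ 0 ≤ x.2 ∧ x.2 < (n : Int)) :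
    ∀ m, pvShape n m → ∀ p q : Int, 0 ≤ p → p < (n : Int) → 0 ≤ q → q < (n : Int) →
    pvEntry (P.foldl (fun m ij => pvSetE m ij.1 ij.2 (pvEntry m ij.1 ij.2 + 1)) m) p q
      = pvEntry m p q + (P.count (p, q) : Int) := by
  induction P with
  | nil => intro m _ p q _ _ _ _; simp
  | cons hd tl ih =>
    intro m hm p q hp0 hp1 hq0 hq1
    obtain ⟨h1, h2, h3, h4⟩ := hP hd (by simp)
    rw [List.foldl_cons,
        ih (fun x hx => hP x (by simp [hx])) _ (pv_shape_set n m hm _ _ _ h1 h2) p q hp0 hp1 hq0 hq1,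
        pv_entry_set n m hm _ h1 h2 h3 h4 hp0 hp1 hq0 hq1, List.count_cons]
    by_cases hpq : hd = (p, q)
    · subst hpq
      rw [if_pos (by simp), if_pos (by simp)]
      push_cast; ring
    · have hp : ¬ (p = hd.1 ∧ q = hd.2) := by
        intro hc; exact hpq (by cases hd; simp_all)
      rw [if_neg hp, if_neg (by simpa using hpq)]
      push_cast; ring

theorem pvEntry_natCast (n : Nat) (m : List (List Int)) (hm : pvShape n m)
    (p q : Nat) (hp : p < n) (hq : q < n) :
    pvEntry m (p : Int) (q : Int) = (m[p]'(by rw [hm.1]; exact hp))[q]'(by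
      rw [hm.2 _ (List.getElem_mem _)]; exact hq) := by
  unfold pvEntry
  rw [PySem.List.pyGetD_ofNat m p [] (by rw [hm.1]; exact hp)]
  rw [PySem.List.pyGetD_ofNat _ q 0 (by rw [hm.2 _ (List.getElem_mem _)]; exact hq)]

theorem pv_mat_ext (n : Nat) (m1 m2 : List (List Int))
    (h1 : pvShape n m1) (h2 : pvShape n m2)
    (he : ∀ p q : Nat, p < n → q < n → pvEntry m1 p q = pvEntry m2 p q) : m1 = m2 := by
  apply List.ext_getElem (by rw [h1.1, h2.1])
  intro p hp1 hp2
  apply List.ext_getElem (by rw [h1.2 _ (List.getElem_mem _), h2.2 _ (List.getElem_mem _)])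
  intro q hq1 hq2
  have hpn : p < n := h1.1 ▸ hp1
  have hqn : q < n := (h1.2 _ (List.getElem_mem _)) ▸ hq1
  have := he p q hpn hqn
  rwa [pvEntry_natCast n m1 h1 p q hpn hqn, pvEntry_natCast n m2 h2 p q hpn hqn] at this

-- the dict comprehension {t : f(t) for t in l} looks up to f
theorem pv_get?_foldl_insert {ν : Type} (f : String → ν) (l : List String) (a : String) :
    ∀ d : PySem.Dict String ν,
    (l.foldl (fun d t => d.insert t (f t)) d).get? a = if a ∈ l then some (f a) else d.get? a := by
  induction l with
  | nil => intro d; simp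
  | cons x l ih =>
    intro d
    rw [List.foldl_cons, ih]
    by_cases hal : a ∈ l
    · rw [if_pos hal, if_pos (by simp [hal])]
    · rw [if_neg hal]
      by_cases hax : a = x
      · subst hax
        rw [PySem.Dict.get?_insert_self, if_pos (by simp)]
      · rw [PySem.Dict.get?_insert_of_ne _ _ hax, if_neg (by simp [hax, hal])]

-- inserting the reversed enumerate makes the FIRST occurrence win: it computes list.index
theorem pv_first_rev (xs : List String) (v : String) :
    ∀ (s : Int) (d : PySem.Dict String Int),
    (((PySem.List.enumerate xs s).reverse).foldl (fun d p => d.insert p.2 p.1) d).get? v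
      = ((PySem.List.index? xs v).map (fun k => s + (k : Int))).or (d.get? v) := by
  induction xs with
  | nil => intro s d; simp [PySem.List.enumerate]
  | cons x xs ih =>
    intro s d
    rw [PySem.List.enumerate_cons, List.reverse_cons, List.foldl_append]
    simp only [List.foldl_cons, List.foldl_nil]
    by_cases hvx : v = x
    · subst hvx
      rw [PySem.Dict.get?_insert_self, PySem.List.index?_cons_self]
      simp
    · rw [PySem.Dict.get?_insert_of_ne _ _ hvx, ih,
          PySem.List.index?_cons_of_ne _ (fun h => hvx h.symm)]
      cases PySem.List.index? xs v with
      | none => simp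
      | some k =>
        have e : s + 1 + (k : Int) = s + ((k + 1 : Nat) : Int) := by push_cast; ring
        simp [e]

-- counting the second components of the pairs whose first component is a IS counting (a, b)
theorem pv_count_filter_snd (l : List (Int × Int)) (a b : Int) :
    ((l.filter (fun p => p.1 == a)).map (·.2)).count b = l.count (a, b) := by
  induction l with
  | nil => simp
  | cons hd tl ih =>
    by_cases h1 : hd.1 = a
    · rw [List.filter_cons_of_pos (by simp [h1]), List.map_cons, List.count_cons, List.count_cons, ih]
      by_cases h2 : hd.2 = b
      · rw [if_pos (by simp [h2]), if_pos (by cases hd; simp_all)]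
      · rw [if_neg (by simp [h2]), if_neg (by cases hd; simp_all)]
    · rw [List.filter_cons_of_neg (by simp [h1]), List.count_cons, ih,
          if_neg (by cases hd; simp_all)]
      simp

-- sentences = [xs[i:i+2] for i in range(len(xs)-1)] is the list of consecutive pairs
theorem pv_sentences (xs : List String) :
    (PySem.List.pyRange 0 ((xs.length : Int) - 1) 1).map
        (fun i => PySem.List.slice xs (some i) (some (i + 2)))
      = (xs.zip xs.tail).map (fun p => [p.1, p.2]) := by
  apply List.ext_getElem
  · simp [PySem.List.length_pyRange_one, List.length_zip, List.length_tail]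
  · intro k h1 h2
    have hk : k + 1 < xs.length := by
      simp [PySem.List.length_pyRange_one] at h1
      omega
    rw [List.getElem_map, List.getElem_map, PySem.List.getElem_pyRange_one]
    have e1 : (0 : Int) + (k : Int) = ((k : Nat) : Int) := by ring
    have e2 : ((k : Nat) : Int) + 2 = ((k : Nat) : Int) + ((2 : Nat) : Int) := by push_cast; ring
    have hdrop : List.take 2 (List.drop k xs) = [xs[k]'(by omega), xs[k + 1]'hk] := by
      rw [List.drop_eq_getElem_cons (by omega), List.drop_eq_getElem_cons (by omega)]
      rfl
    rw [e1, e2, PySem.List.slice_natCast_add, hdrop, List.getElem_zip]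
    simp [List.getElem_tail]

theorem pv_shape_fold_bump (n : Nat) (P : List (Int × Int))
    (hP : ∀ x ∈ P, 0 ≤ x.1 ∧ x.1 < (n : Int)) :
    ∀ m, pvShape n m →
    pvShape n (P.foldl (fun m ij => pvSetE m ij.1 ij.2 (pvEntry m ij.1 ij.2 + 1)) m) := by
  induction P with
  | nil => intro m hm; exact hm
  | cons hd tl ih =>
    intro m hm
    obtain ⟨h1, h2⟩ := hP hd (by simp)
    exact ih (fun x hx => hP x (by simp [hx])) _ (pv_shape_set n m hm _ _ _ h1 h2)

theorem pv_main (tokenized_text tokens : List String)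
    (hpre : ∀ t ∈ tokenized_text, t ∈ tokens) :
    get_cooccurence_matrix tokenized_text tokens = get_cooccurence_matrix_alt tokenized_text tokens := by
  classical
  have hgetD : ∀ (d : PySem.Dict String Int) (t : String), d.getD t 0 = (d.get? t).getD 0 :=
    fun _ _ => rfl
  -- A's index values
  have hfa : ∀ t ∈ tokens, ∃ k : Nat,
      PySem.List.index? tokens t = some k ∧ k < tokens.length := by
    intro t ht
    obtain ⟨k, hk⟩ := Option.isSome_iff_exists.mp ((PySem.List.index?_isSome_iff tokens t).mpr ht)
    obtain ⟨hlt, -, -⟩ := PySem.List.getElem_of_index?_eq_some hk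
    exact ⟨k, hk, hlt⟩
  -- B's reversed-enumerate first map agrees with A's tokens.index on members of tokens
  have hfAB : ∀ t ∈ tokens,
      (((PySem.List.enumerate tokens 0).reverse).foldl
          (fun d p => d.insert p.2 p.1) PySem.Dict.empty).getD t 0
        = (((PySem.List.index? tokens t).getD 0 : Nat) : Int) := by
    intro t ht
    obtain ⟨k, hk, -⟩ := hfa t ht
    rw [hgetD, pv_first_rev tokens t 0 PySem.Dict.empty, PySem.Dict.get?_empty, hk]
    simp
  -- hence the two token_indexes dicts are the same dict
  have hdict :
      tokenized_text.foldl
          (fun d t => d.insert t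
            ((((PySem.List.enumerate tokens 0).reverse).foldl
                (fun d p => d.insert p.2 p.1) PySem.Dict.empty).getD t 0))
          PySem.Dict.empty
        = tokenized_text.foldl
            (fun d token => d.insert token (((PySem.List.index? tokens token).getD 0 : Nat) : Int))
            PySem.Dict.empty := by
    apply PySem.List.foldl_congr_mem
    intro acc x hx
    rw [hfAB x (hpre x hx)]
  simp only [get_cooccurence_matrix, get_cooccurence_matrix_alt]
  rw [hdict]
  -- name the shared pieces
  set n := tokens.length with hn
  set dictA : PySem.Dict String Int :=
    tokenized_text.foldl
      (fun d token => d.insert token (((PySem.List.index? tokens token).getD 0 : Nat) : Int))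
      PySem.Dict.empty with hdA
  -- lookups in the comprehension dict
  have hlook : ∀ t ∈ tokenized_text,
      dictA.getD t 0 = (((PySem.List.index? tokens t).getD 0 : Nat) : Int) := by
    intro t ht
    rw [hgetD, hdA, pv_get?_foldl_insert _ tokenized_text t PySem.Dict.empty, if_pos ht]
    rfl
  have hbnd : ∀ t ∈ tokenized_text, 0 ≤ dictA.getD t 0 ∧ dictA.getD t 0 < (n : Int) := by
    intro t ht
    obtain ⟨k, hk, hlt⟩ := hfa t (hpre t ht)
    rw [hlook t ht, hk]
    constructor
    · positivity
    · simpa using hlt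
  -- the list of consecutive index pairs
  set pr := tokenized_text.zip tokenized_text.tail with hpr
  have hprmem : ∀ p ∈ pr, p.1 ∈ tokenized_text ∧ p.2 ∈ tokenized_text := by
    intro p hp
    obtain ⟨a, b⟩ := p
    obtain ⟨ha, hb⟩ := List.of_mem_zip hp
    exact ⟨ha, List.mem_of_mem_tail hb⟩
  set P : List (Int × Int) := pr.map (fun p => (dictA.getD p.1 0, dictA.getD p.2 0)) with hP
  have hPbnd : ∀ x ∈ P, 0 ≤ x.1 ∧ x.1 < (n : Int) ∧ 0 ≤ x.2 ∧ x.2 < (n : Int) := by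
    intro x hx
    rw [hP] at hx
    obtain ⟨p, hp, rfl⟩ := List.mem_map.mp hx
    obtain ⟨h1, h2⟩ := hprmem p hp
    exact ⟨(hbnd _ h1).1, (hbnd _ h1).2, (hbnd _ h2).1, (hbnd _ h2).2⟩
  -- the zero matrix
  have hZ : tokens.map (fun _ => tokens.map (fun _ => (0 : Int)))
      = List.replicate n (List.replicate n (0 : Int)) := by
    rw [List.map_const', List.map_const']
  have hZsh : pvShape n (List.replicate n (List.replicate n (0 : Int))) :=
    ⟨by simp, by intro r hr; rw [List.eq_of_mem_replicate hr]; simp⟩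
  -- fst components
  refine Prod.ext ?_ rfl
  show (((PySem.List.pyRange 0 ((tokenized_text.length : Int) - 1) 1).map
      (fun i => PySem.List.slice tokenized_text (some i) (some (i + 2)))).foldl _ _) = _
  rw [pv_sentences tokenized_text, List.foldl_map, hZ]
  -- B's pairs over the index sequence ARE P
  have hseq : (tokenized_text.map (fun t => dictA.getD t 0)).zip
      (tokenized_text.map (fun t => dictA.getD t 0)).tail = P := by
    rw [hP, hpr, ← List.map_tail, List.zip_map]
    rfl
  rw [hseq]
  have hA : pr.foldl
      (fun m p => pvSetE m (dictA.getD p.1 0) (dictA.getD p.2 0)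
        (pvEntry m (dictA.getD p.1 0) (dictA.getD p.2 0) + 1))
      (List.replicate n (List.replicate n 0))
    = P.foldl (fun m ij => pvSetE m ij.1 ij.2 (pvEntry m ij.1 ij.2 + 1))
        (List.replicate n (List.replicate n 0)) := by
    rw [hP, List.foldl_map]
  show pr.foldl
      (fun m p => pvSetE m (dictA.getD p.1 0) (dictA.getD p.2 0)
        (pvEntry m (dictA.getD p.1 0) (dictA.getD p.2 0) + 1))
      (List.replicate n (List.replicate n 0))
    = (PySem.List.pyRange 0 (n : Int) 1).map
        (fun i => (PySem.List.pyRange 0 (n : Int) 1).map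
          (fun j => ((((P.foldl (fun d p => d.modify p.1 [] (· ++ [p.2]))
              PySem.Dict.empty).getD i []).count j : Nat) : Int)))
  rw [hA]
  have hBsh : pvShape n ((PySem.List.pyRange 0 (n : Int) 1).map
      (fun i => (PySem.List.pyRange 0 (n : Int) 1).map
        (fun j => ((((P.foldl (fun d p => d.modify p.1 [] (· ++ [p.2]))
            PySem.Dict.empty).getD i []).count j : Nat) : Int)))) := by
    constructor
    · simp [PySem.List.length_pyRange_one]
    · intro r hr
      obtain ⟨i, -, rfl⟩ := List.mem_map.mp hr
      simp [PySem.List.length_pyRange_one]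
  refine pv_mat_ext n _ _
      (pv_shape_fold_bump n P (fun x hx => ⟨(hPbnd x hx).1, (hPbnd x hx).2.1⟩) _ hZsh)
      hBsh ?_
  intro p q hp hq
  have hp0 : (0 : Int) ≤ (p : Int) := by positivity
  have hq0 : (0 : Int) ≤ (q : Int) := by positivity
  have hp1 : (p : Int) < (n : Int) := by exact_mod_cast hp
  have hq1 : (q : Int) < (n : Int) := by exact_mod_cast hq
  have hz : pvEntry (List.replicate n (List.replicate n (0 : Int))) p q = 0 := by
    rw [pvEntry_natCast n _ hZsh p q hp hq]; simp
  have hBv : pvEntry ((PySem.List.pyRange 0 (n : Int) 1).map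
      (fun i => (PySem.List.pyRange 0 (n : Int) 1).map
        (fun j => ((((P.foldl (fun d x => d.modify x.1 [] (· ++ [x.2]))
            PySem.Dict.empty).getD i []).count j : Nat) : Int)))) p q
      = ((P.count ((p : Int), (q : Int)) : Nat) : Int) := by
    unfold pvEntry
    rw [PySem.List.pyGetD_map_pyRange _ n p _ hp, PySem.List.pyGetD_map_pyRange _ n q _ hq,
        PySem.Dict.getD_foldl_modify_append, PySem.Dict.getD_empty, List.nil_append,
        pv_count_filter_snd]
  rw [pv_fold_bump n P hPbnd _ hZsh _ _ hp0 hp1 hq0 hq1, hz, zero_add, hBv]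
-- ===== VERDICT (by name: the statement is the Claim_ definition above) =====
theorem get_cooccurence_matrix_spec : Claim_equal_get_cooccurence_matrix := by
  intro tt tk _ hpre
  unfold Spec_get_cooccurence_matrix
  exact pv_main tt tk hpre
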